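-- pv_equiv track=rewrite | github.com/hi2242/python-tutorial | 백준/Gold/11444. 피보나치 수 6/피보나치 수 6.py | calc_order
-- ===== SOURCE A (Python) =====
-- def calc_order(k):
--     calc = []
--     while k != 1:
--         if k % 2 == 1:
--             k -= 1
--             calc.append("multi")
--
--         else:
--             k //= 2
--             calc.append("power")
--
--     return calc
-- ===== SOURCE B (Python) =====
-- def calc_order(k):
--     ops = []
--     for c in bin(k)[3:]:  # binary digits of k after the leading 1
--         ops.append("power")
--         if c == "1":
--             ops.append("multi")
--     return ops[::-1]
-- ===== Notes on version B (the rewrite author's own statement) =====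
-- stated objective: alternative
-- what changed: Replaces A's subtract-or-halve while-loop that mutates k by a single left-to-right pass over the binary digits of k (bin(k)[3:]) emitting 'power' per digit and 'multi' after each 1-digit, then reversing the list.
-- outside the precondition, e.g. on calc_order(0): A does not finish within the time limit, B returns []
import Mathlib
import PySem

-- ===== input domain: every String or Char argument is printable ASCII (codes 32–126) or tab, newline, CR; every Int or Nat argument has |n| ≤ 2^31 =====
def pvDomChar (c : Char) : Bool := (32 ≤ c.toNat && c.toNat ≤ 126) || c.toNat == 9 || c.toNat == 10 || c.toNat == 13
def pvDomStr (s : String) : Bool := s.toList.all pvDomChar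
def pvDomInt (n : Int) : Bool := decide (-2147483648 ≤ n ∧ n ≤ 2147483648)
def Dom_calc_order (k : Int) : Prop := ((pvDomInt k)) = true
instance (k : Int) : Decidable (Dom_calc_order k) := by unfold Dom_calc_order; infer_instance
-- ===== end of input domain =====

-- B replaces A's subtract-or-halve loop by a single pass over the binary digits of k
-- (bin(k)[3:]), emitting "power" per digit and "multi" after each 1-digit, then reversing
-- (objective: alternative; same O(log k) cost).


-- ===== PORT A =====
-- the while-loop of A; the `k ≤ 0` guard only makes the function total
-- (Python A never terminates there; Pre_ excludes those inputs)
def calcOrderLoop (k : Int) (ops : List String) : List String :=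
  if _h1 : k = 1 then ops
  else if _h0 : k ≤ 0 then ops
  else if PySem.Int.mod k 2 = 1 then
    calcOrderLoop (k - 1) (ops ++ ["multi"])
  else
    calcOrderLoop (PySem.Int.floordiv k 2) (ops ++ ["power"])
termination_by k.toNat
decreasing_by
  · omega
  · rw [PySem.Int.floordiv_eq_ediv_of_pos (by omega)]; omega

def calc_order (k : Int) : List String := calcOrderLoop k []

-- ===== PORT B =====
-- bin(n)[3:] for n ≥ 1: the binary digits of n after the leading 1, most significant first
def binDigits (n : Nat) : List Char :=
  if n ≤ 1 then []
  else binDigits (n / 2) ++ [if n % 2 = 1 then '1' else '0']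

def calc_order_alt (k : Int) : List String :=
  ((binDigits k.toNat).foldl
    (fun ops c => ops ++ (if c = '1' then ["power", "multi"] else ["power"])) []).reverse

-- ===== PRECONDITION & SPEC =====
-- Pre_ excludes k ≤ 0, on which Python A loops forever (never returns).
def Pre_calc_order (k : Int) : Prop := 1 ≤ k
instance (k : Int) : Decidable (Pre_calc_order k) := by unfold Pre_calc_order; infer_instance
def pvWitness_calc_order : Int := (5)

def Spec_calc_order (k : Int) (out : List String) : Prop := out = calc_order_alt k
instance (k : Int) (out : List String) : Decidable (Spec_calc_order k out) := by unfold Spec_calc_order; infer_instance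

-- ===== CLAIM (what is proved, stated in full; the proofs are below) =====
def Claim_equal_calc_order : Prop := ∀ (k : Int), Dom_calc_order k → Pre_calc_order k → Spec_calc_order k (calc_order k)

-- ===== LEMMAS AND PROOFS =====

-- on positive inputs, Python // 2 and % 2 are Lean's Int ediv/emod
theorem fd2 (a : Int) : PySem.Int.floordiv a 2 = a / 2 :=
  PySem.Int.floordiv_eq_ediv_of_pos (by omega)
theorem md2 (a : Int) : PySem.Int.mod a 2 = a % 2 :=
  PySem.Int.mod_eq_emod_of_pos (by omega)

-- the loop body appended to an accumulator factors out
theorem calcOrderLoop_acc (n : Nat) : ∀ (k : Int), k.toNat = n →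
    ∀ acc, calcOrderLoop k acc = acc ++ calcOrderLoop k [] := by
  induction n using Nat.strong_induction_on with
  | _ n ih =>
    intro k hk acc
    by_cases h1 : k = 1
    · simp [calcOrderLoop, h1]
    · by_cases h0 : k ≤ 0
      · conv_lhs => rw [calcOrderLoop]
        conv_rhs => rw [calcOrderLoop]
        simp [h1, h0]
      · conv_lhs => rw [calcOrderLoop]
        conv_rhs => rw [calcOrderLoop]
        simp only [h1, h0, dif_neg, not_false_iff]
        by_cases hm : PySem.Int.mod k 2 = 1
        · rw [if_pos hm, if_pos hm,
            ih (k - 1).toNat (by omega) (k - 1) rfl (acc ++ ["multi"]),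
            ih (k - 1).toNat (by omega) (k - 1) rfl (([] : List String) ++ ["multi"])]
          simp
        · rw [if_neg hm, if_neg hm]
          rw [md2] at hm
          have hlt : (PySem.Int.floordiv k 2).toNat < n := by rw [fd2]; omega
          rw [ih _ hlt _ rfl (acc ++ ["power"]),
              ih _ hlt _ rfl (([] : List String) ++ ["power"])]
          simp

-- B's fold with a seed factors out
theorem foldB_acc (ds : List Char) (acc : List String) :
    ds.foldl (fun ops c => ops ++ (if c = '1' then ["power", "multi"] else ["power"])) acc
    = acc ++ ds.foldl (fun ops c => ops ++ (if c = '1' then ["power", "multi"] else ["power"])) [] := by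
  induction ds generalizing acc with
  | nil => simp
  | cons c ds ih =>
      simp only [List.foldl_cons]
      rw [ih, ih (([] : List String) ++ _)]
      simp

-- core equivalence on naturals
theorem core (n : Nat) (hn : 1 ≤ n) :
    calcOrderLoop (n : Int) [] =
    ((binDigits n).foldl
      (fun ops c => ops ++ (if c = '1' then ["power", "multi"] else ["power"])) []).reverse := by
  induction n using Nat.strong_induction_on with
  | _ n ih =>
    rcases Nat.lt_or_ge n 2 with h2 | h2
    · interval_cases n
      · rw [calcOrderLoop]; simp [binDigits]
    · have hn1 : (n : Int) ≠ 1 := by omega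
      have hn0 : ¬ ((n : Int) ≤ 0) := by omega
      rw [calcOrderLoop, binDigits]
      simp only [hn1, hn0, dif_neg, not_false_iff]
      have hbd : ¬ (n ≤ 1) := by omega
      rw [if_neg hbd, List.foldl_append, foldB_acc]
      have hfd : PySem.Int.floordiv (n : Int) 2 = ((n / 2 : Nat) : Int) := by
        rw [fd2]; omega
      rcases Nat.even_or_odd n with he | ho
      · -- n even
        have hd : n % 2 ≠ 1 := by rcases he with ⟨m, hm⟩; omega
        have hm : ¬ (PySem.Int.mod (n : Int) 2 = 1) := by rw [md2]; omega
        rw [if_neg hm, hfd, calcOrderLoop_acc _ _ rfl, ih (n / 2) (by omega) (by omega)]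
        simp [hd]
      · -- n odd: A emits "multi", then on the even n-1 emits "power"
        have hd : n % 2 = 1 := Nat.odd_iff.mp ho
        have hm : PySem.Int.mod (n : Int) 2 = 1 := by rw [md2]; omega
        rw [if_pos hm, calcOrderLoop_acc _ _ rfl]
        have hn1' : ((n : Int) - 1) ≠ 1 := by omega
        have hn0' : ¬ (((n : Int) - 1) ≤ 0) := by omega
        rw [calcOrderLoop]
        have hm' : ¬ (PySem.Int.mod ((n : Int) - 1) 2 = 1) := by rw [md2]; omega
        simp only [hn1', hn0', dif_neg, not_false_iff]
        rw [if_neg hm', calcOrderLoop_acc _ _ rfl]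
        have hfd' : PySem.Int.floordiv ((n : Int) - 1) 2 = ((n / 2 : Nat) : Int) := by
          rw [fd2]; omega
        rw [hfd', ih (n / 2) (by omega) (by omega)]
        simp [hd]

-- ===== VERDICT (by name: the statement is the Claim_ definition above) =====
theorem calc_order_spec : Claim_equal_calc_order := by
  intro k _ hk
  unfold Pre_calc_order at hk
  unfold Spec_calc_order calc_order calc_order_alt
  have hkn : k = ((k.toNat : Nat) : Int) := by omega
  rw [hkn]
  exact core k.toNat (by omega)
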